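-- pv_equiv track=rewrite | github.com/bennyhodl/hermes-agent | gateway/platforms/slack_utils.py | is_slack_hostname
-- ===== SOURCE A (Python) =====
-- SLACK_ALLOWED_HOSTNAMES = (
--     "slack.com",
--     "*.slack.com",
--     "slack-edge.com",
--     "*.slack-edge.com",
--     "slack-files.com",
--     "*.slack-files.com",
-- )
--
-- def is_slack_hostname(hostname: str) -> bool:
--     """Check if hostname matches allowed Slack domains."""
--     if not hostname:
--         return False
--
--     hostname = hostname.lower().rstrip(".")
--
--     for pattern in SLACK_ALLOWED_HOSTNAMES:
--         if pattern.startswith("*."):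
--             # Wildcard match
--             suffix = pattern[2:]  # Remove "*."
--             if hostname == suffix or hostname.endswith(f".{suffix}"):
--                 return True
--         else:
--             if hostname == pattern:
--                 return True
--
--     return False
-- ===== SOURCE B (Python) =====
-- _SLACK_BASE_DOMAINS = ("slack.com", "slack-edge.com", "slack-files.com")
--
--
-- def is_slack_hostname(hostname: str) -> bool:
--     """Check if hostname matches allowed Slack domains."""
--     if not hostname:
--         return False
--
--     hostname = hostname.lower().rstrip(".")
--
--     return any(hostname == base or hostname.endswith("." + base)
--                for base in _SLACK_BASE_DOMAINS)
-- ===== Notes on version B (the rewrite author's own statement) =====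
-- stated objective: simpler
-- what changed: Replaces the six-entry pattern table and its wildcard/exact branch dispatch with a single any() over the three base domains, unifying both pattern kinds into one equality-or-dot-suffix condition.
import Mathlib
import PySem

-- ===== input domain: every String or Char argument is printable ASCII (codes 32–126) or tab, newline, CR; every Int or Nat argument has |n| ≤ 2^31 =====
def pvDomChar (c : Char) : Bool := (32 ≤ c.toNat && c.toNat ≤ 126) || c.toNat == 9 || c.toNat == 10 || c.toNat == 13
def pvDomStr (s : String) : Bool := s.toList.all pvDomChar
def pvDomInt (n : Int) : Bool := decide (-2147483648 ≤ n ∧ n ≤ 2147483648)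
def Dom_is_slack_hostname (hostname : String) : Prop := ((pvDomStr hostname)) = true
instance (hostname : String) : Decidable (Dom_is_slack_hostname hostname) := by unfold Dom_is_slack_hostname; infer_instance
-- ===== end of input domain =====

-- B simplifies A: one uniform condition over the three base domains instead of a
-- six-entry pattern table with a wildcard/exact branch (objective: simpler).

-- exact port of Python str.rstrip(".") for the single strip character "."
def pyRstripDot (s : String) : String :=
  String.mk ((s.toList.reverse.dropWhile (fun c => c == '.')).reverse)

-- ===== PORT A =====
def slackAllowedHostnames : List String :=
  ["slack.com", "*.slack.com", "slack-edge.com", "*.slack-edge.com",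
   "slack-files.com", "*.slack-files.com"]

-- the for-loop with early return, as structural recursion over the pattern list
def slackLoop (h : String) : List String → Bool
  | [] => false
  | p :: ps =>
    if PySem.Str.startswith p "*." then
      -- wildcard match; suffix = pattern[2:]
      let suffix := PySem.Str.slice p (some 2)
      if h == suffix || PySem.Str.endswith h (String.append "." suffix) then true
      else slackLoop h ps
    else
      if h == p then true
      else slackLoop h ps

def is_slack_hostname (hostname : String) : Bool :=
  if hostname == "" then false
  else
    slackLoop (pyRstripDot (PySem.Str.lower hostname)) slackAllowedHostnames

-- ===== PORT B =====
def slackBaseDomains : List String := ["slack.com", "slack-edge.com", "slack-files.com"]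

def is_slack_hostname_alt (hostname : String) : Bool :=
  if hostname == "" then false
  else
    let h := pyRstripDot (PySem.Str.lower hostname)
    slackBaseDomains.any (fun base => h == base || PySem.Str.endswith h (String.append "." base))

-- ===== PRECONDITION & SPEC =====
def Spec_is_slack_hostname (hostname : String) (out : Bool) : Prop := out = is_slack_hostname_alt hostname
instance (hostname : String) (out : Bool) : Decidable (Spec_is_slack_hostname hostname out) := by unfold Spec_is_slack_hostname; infer_instance

-- ===== CLAIM (what is proved, stated in full; the proofs are below) =====
def Claim_equal_is_slack_hostname : Prop := ∀ (hostname : String), Dom_is_slack_hostname hostname → Spec_is_slack_hostname hostname (is_slack_hostname hostname)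

-- ===== LEMMAS AND PROOFS =====

-- A's if-early-return chain collapses to B's disjunction, atom by atom
theorem slack_bool_shape (a b c d e f : Bool) :
    (if a then true else if (a || b) then true else
     if c then true else if (c || d) then true else
     if e then true else if (e || f) then true else false)
    = ((a || b) || ((c || d) || ((e || f) || false))) := by
  cases a <;> cases b <;> cases c <;> cases d <;> cases e <;> cases f <;> decide

theorem slackLoop_eq (h : String) :
    slackLoop h slackAllowedHostnames
    = slackBaseDomains.any
        (fun base => h == base || PySem.Str.endswith h (String.append "." base)) := by
  have h1 : PySem.Str.startswith "slack.com" "*." = false := by decide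
  have h2 : PySem.Str.startswith "*.slack.com" "*." = true := by decide
  have h3 : PySem.Str.startswith "slack-edge.com" "*." = false := by decide
  have h4 : PySem.Str.startswith "*.slack-edge.com" "*." = true := by decide
  have h5 : PySem.Str.startswith "slack-files.com" "*." = false := by decide
  have h6 : PySem.Str.startswith "*.slack-files.com" "*." = true := by decide
  have s2 : PySem.Str.slice "*.slack.com" (some 2) = "slack.com" := by decide
  have s4 : PySem.Str.slice "*.slack-edge.com" (some 2) = "slack-edge.com" := by decide
  have s6 : PySem.Str.slice "*.slack-files.com" (some 2) = "slack-files.com" := by decide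
  simp only [slackAllowedHostnames, slackBaseDomains, slackLoop, List.any,
    h1, h2, h3, h4, h5, h6, s2, s4, s6, Bool.false_eq_true, if_false, if_true]
  exact slack_bool_shape _ _ _ _ _ _

-- ===== VERDICT (by name: the statement is the Claim_ definition above) =====
theorem is_slack_hostname_spec : Claim_equal_is_slack_hostname := by
  intro hostname _
  unfold Spec_is_slack_hostname is_slack_hostname is_slack_hostname_alt
  by_cases hE : hostname == ""
  · simp [hE]
  · simp only [hE, Bool.false_eq_true, if_false]
    exact slackLoop_eq _
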